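-- pv_equiv track=rewrite | github.com/GeekyAmit5/old-files | HackerEarth/test17.py | sticks
-- ===== SOURCE A (Python) =====
-- def sticks(n):
--     if n//10 == 0:
--         if n == 0 or n == 9 or n == 6:
--             return 6
--         elif n == 1:
--             return 2
--         elif n == 2 or n == 3 or n == 5:
--             return 5
--         elif n == 4:
--             return 4
--         elif n == 7:
--             return 3
--         elif n == 8:
--             return 7
--     else:
--         return sticks(n % 10) + sticks(n//10)
-- ===== SOURCE B (Python) =====
-- def sticks(n):
--     counts = (6, 2, 5, 5, 4, 5, 6, 3, 7, 6)
--     if n == 0: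
--         return 6
--     total = 0
--     while n:
--         total += counts[n % 10]
--         n //= 10
--     return total
-- ===== Notes on version B (the rewrite author's own statement) =====
-- stated objective: idiomatic
-- what changed: Replaces the digit-position recursion with an if/elif chain per digit by a flat while-loop over the digits with a lookup table of stick counts, special-casing 0.
import Mathlib
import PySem

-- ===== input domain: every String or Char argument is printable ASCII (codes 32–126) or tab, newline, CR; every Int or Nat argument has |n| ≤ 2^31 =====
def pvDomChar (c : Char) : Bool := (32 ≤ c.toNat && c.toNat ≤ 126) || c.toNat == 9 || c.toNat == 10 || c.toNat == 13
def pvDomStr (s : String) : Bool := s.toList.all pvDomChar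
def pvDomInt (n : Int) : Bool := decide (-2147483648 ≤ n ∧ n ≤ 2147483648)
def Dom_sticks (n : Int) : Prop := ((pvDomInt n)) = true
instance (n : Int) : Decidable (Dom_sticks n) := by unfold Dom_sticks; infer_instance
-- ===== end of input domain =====

-- B replaces A's per-digit if/elif recursion by a table-lookup while-loop (idiomatic, same cost).
-- Pre_ restricts to 0 ≤ n: for n < 0 Python A recurses forever (RecursionError), so the
-- ports recurse on n.toNat (exact for n ≥ 0).

-- ===== PORT A =====
-- literal transliteration of A's recursion; on Nat, / and % agree with Python's // and % .
def sticksGo (m : Nat) : Int :=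
  if m / 10 = 0 then
    (if m = 0 ∨ m = 9 ∨ m = 6 then 6
     else if m = 1 then 2
     else if m = 2 ∨ m = 3 ∨ m = 5 then 5
     else if m = 4 then 4
     else if m = 7 then 3
     else 7)  -- m = 8 (m/10 = 0 leaves only digits 0..9)
  else sticksGo (m % 10) + sticksGo (m / 10)
decreasing_by
  · exact Nat.lt_of_lt_of_le (Nat.mod_lt _ (by omega)) (by omega)
  · exact Nat.div_lt_self (by omega) (by omega)

def sticks (n : Int) : Int := sticksGo n.toNat

-- ===== PORT B =====
def pvCounts : List Int := [6, 2, 5, 5, 4, 5, 6, 3, 7, 6]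

-- the while loop of B: total accumulator, n shrinks by //10
def sticksAltGo (m : Nat) (total : Int) : Int :=
  if m = 0 then total
  else sticksAltGo (m / 10) (total + pvCounts.getD (m % 10) 0)
decreasing_by exact Nat.div_lt_self (by omega) (by omega)

def sticks_alt (n : Int) : Int :=
  if n = 0 then 6 else sticksAltGo n.toNat 0

-- ===== PRECONDITION & SPEC =====
-- Pre_ excludes n < 0, where Python A raises RecursionError (it never returns).
def Pre_sticks (n : Int) : Prop := 0 ≤ n
instance (n : Int) : Decidable (Pre_sticks n) := by unfold Pre_sticks; infer_instance
def pvWitness_sticks : Int := 123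

def Spec_sticks (n : Int) (out : Int) : Prop := out = sticks_alt n
instance (n : Int) (out : Int) : Decidable (Spec_sticks n out) := by unfold Spec_sticks; infer_instance

-- ===== CLAIM (what is proved, stated in full; the proofs are below) =====
def Claim_equal_sticks : Prop := ∀ (n : Int), Dom_sticks n → Pre_sticks n → Spec_sticks n (sticks n)

-- ===== LEMMAS AND PROOFS =====

-- the table agrees with A's if/elif chain on every digit
theorem counts_eq_sticksGo (d : Nat) (hd : d < 10) : pvCounts.getD d 0 = sticksGo d := by
  interval_cases d <;> simp [pvCounts, sticksGo]

-- the accumulator factors out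
theorem sticksAltGo_acc (m : Nat) : ∀ (t : Int), sticksAltGo m t = t + sticksAltGo m 0 := by
  induction m using Nat.strong_induction_on with
  | _ m ih =>
    intro t
    by_cases h : m = 0
    · simp [h, sticksAltGo]
    · conv_lhs => rw [sticksAltGo]
      conv_rhs => rw [sticksAltGo]
      rw [if_neg h, if_neg h,
        ih (m / 10) (Nat.div_lt_self (by omega) (by omega)) (t + pvCounts.getD (m % 10) 0),
        ih (m / 10) (Nat.div_lt_self (by omega) (by omega)) (0 + pvCounts.getD (m % 10) 0)]
      ring

theorem altGo_eq_sticksGo (m : Nat) (hm : m ≠ 0) : sticksAltGo m 0 = sticksGo m := by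
  induction m using Nat.strong_induction_on with
  | _ m ih =>
    by_cases h : m / 10 = 0
    · have hlt : m < 10 := by omega
      rw [sticksAltGo, if_neg hm, h, sticksAltGo, if_pos rfl, zero_add,
        Nat.mod_eq_of_lt hlt, counts_eq_sticksGo m hlt]
    · conv_lhs => rw [sticksAltGo]
      rw [if_neg hm, zero_add, sticksAltGo_acc,
        ih (m / 10) (Nat.div_lt_self (by omega) (by omega)) h,
        counts_eq_sticksGo (m % 10) (Nat.mod_lt _ (by omega))]
      conv_rhs => rw [sticksGo]
      rw [if_neg h]

-- ===== VERDICT (by name: the statement is the Claim_ definition above) =====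
theorem sticks_spec : Claim_equal_sticks := by
  intro n _ hpre
  unfold Spec_sticks sticks sticks_alt
  by_cases h0 : n = 0
  · simp [h0, sticksGo]
  · rw [if_neg h0, altGo_eq_sticksGo n.toNat (by unfold Pre_sticks at hpre; omega)]
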